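-- pv_equiv track=rewrite | github.com/aliaskh4n/project1 | app.py | determine_color
-- ===== SOURCE A (Python) =====
-- def determine_color(word, company_names, person_names, city_names):
--     if word.lower() in (company.lower() for company in company_names):
--         return 'orange'
--     elif word.lower() in (person_name.lower() for person_name in person_names):
--         return 'blue'
--     elif word.lower() in (city_name.lower() for city_name in city_names):
--         return 'red'
--     else:
--         return 'black'
-- ===== SOURCE B (Python) =====
-- def determine_color(word, company_names, person_names, city_names):
--     w = word.lower()
--     colors = ('orange', 'blue', 'red', 'black')
--     rank = 3
--     for r, names in enumerate((company_names, person_names, city_names)):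
--         for name in names:
--             if name.lower() == w and r < rank:
--                 rank = r
--     return colors[rank]
-- ===== Notes on version B (the rewrite author's own statement) =====
-- stated objective: alternative
-- what changed: Replaces three sequential short-circuiting membership scans by one unified full pass over all three groups that maintains a numeric minimum-priority accumulator, and finally indexes a color table by that rank.
import Mathlib
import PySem

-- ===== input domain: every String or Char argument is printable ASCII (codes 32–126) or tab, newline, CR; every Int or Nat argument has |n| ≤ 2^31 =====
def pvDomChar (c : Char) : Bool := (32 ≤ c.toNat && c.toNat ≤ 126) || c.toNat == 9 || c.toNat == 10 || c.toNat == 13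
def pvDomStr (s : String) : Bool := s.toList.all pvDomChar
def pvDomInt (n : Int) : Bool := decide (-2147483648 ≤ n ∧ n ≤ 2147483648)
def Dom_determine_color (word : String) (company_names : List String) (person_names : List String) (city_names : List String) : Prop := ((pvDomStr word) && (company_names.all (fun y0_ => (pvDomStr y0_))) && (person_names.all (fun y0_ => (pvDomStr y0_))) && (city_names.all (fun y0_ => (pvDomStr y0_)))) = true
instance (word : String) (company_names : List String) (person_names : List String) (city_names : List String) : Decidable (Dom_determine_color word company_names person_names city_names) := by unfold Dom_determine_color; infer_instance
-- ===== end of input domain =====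

-- B replaces A's three short-circuiting membership scans by one full min-rank accumulator pass over all groups; alternative decomposition, same cost.


-- ===== PORT A =====
def determine_color (word : String) (company_names : List String) (person_names : List String) (city_names : List String) : String :=
  if company_names.any (fun company => PySem.Str.lower word == PySem.Str.lower company) then "orange"
  else if person_names.any (fun person_name => PySem.Str.lower word == PySem.Str.lower person_name) then "blue"
  else if city_names.any (fun city_name => PySem.Str.lower word == PySem.Str.lower city_name) then "red"
  else "black"

-- ===== PORT B =====
-- single pass over enumerated groups maintaining the minimum matching rank;
-- colors[rank] is ported with pyGet?/getD — exact since rank is always 0..3, in range.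
def determine_color_alt (word : String) (company_names : List String) (person_names : List String) (city_names : List String) : String :=
  let w := PySem.Str.lower word
  let colors : List String := ["orange", "blue", "red", "black"]
  let rank : Int :=
    (PySem.List.enumerate [company_names, person_names, city_names]).foldl
      (fun rank p =>
        p.2.foldl (fun rank name =>
          if (PySem.Str.lower name == w) = true ∧ p.1 < rank then p.1 else rank) rank) 3
  (PySem.List.pyGet? colors rank).getD "black"

-- ===== PRECONDITION & SPEC =====
def Spec_determine_color (word : String) (company_names : List String) (person_names : List String) (city_names : List String) (out : String) : Prop := out = determine_color_alt word company_names person_names city_names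
instance (word : String) (company_names : List String) (person_names : List String) (city_names : List String) (out : String) : Decidable (Spec_determine_color word company_names person_names city_names out) := by unfold Spec_determine_color; infer_instance

-- ===== CLAIM (what is proved, stated in full; the proofs are below) =====
def Claim_equal_determine_color : Prop := ∀ (word : String) (company_names : List String) (person_names : List String) (city_names : List String), Dom_determine_color word company_names person_names city_names → Spec_determine_color word company_names person_names city_names (determine_color word company_names person_names city_names)

-- ===== LEMMAS AND PROOFS =====
-- the inner fold over one group either lowers the rank to r (if some name matches and r is smaller) or keeps it
theorem inner_fold_min (names : List String) (w : String) (r rank : Int) :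
    names.foldl (fun rank name =>
        if (PySem.Str.lower name == w) = true ∧ r < rank then r else rank) rank
      = if names.any (fun name => PySem.Str.lower name == w) ∧ r < rank then r else rank := by
  induction names generalizing rank with
  | nil => simp
  | cons x xs ih =>
    simp only [List.foldl_cons, List.any_cons, ih]
    by_cases hx : (PySem.Str.lower x == w) = true <;>
      by_cases hr : r < rank <;>
      simp_all <;> omega

theorem determine_color_spec : Claim_equal_determine_color := by
  intro word company_names person_names city_names _
  unfold Spec_determine_color determine_color determine_color_alt
  simp only [PySem.List.enumerate, List.foldl_cons, List.foldl_nil, inner_fold_min]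
  have hcomm : ∀ xs : List String,
      xs.any (fun n => PySem.Str.lower n == PySem.Str.lower word)
        = xs.any (fun n => PySem.Str.lower word == PySem.Str.lower n) := by
    intro xs; simp [List.any_eq, BEq.comm]
  by_cases hc : company_names.any (fun n => PySem.Str.lower n == PySem.Str.lower word) = true <;>
    by_cases hp : person_names.any (fun n => PySem.Str.lower n == PySem.Str.lower word) = true <;>
    by_cases hci : city_names.any (fun n => PySem.Str.lower n == PySem.Str.lower word) = true <;>
    simp [hc, hp, hci, ← hcomm, PySem.List.pyGet?, PySem.List.pyIdx?]
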